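-- pv_equiv track=rewrite | github.com/DaChosens1/usaco | 2016/January/January 2016 Prob 1/2016_1_promocount.py | follow_through
-- ===== SOURCE A (Python) =====
-- def follow_through(levels):
--     temp = levels[::]
--     answer = [0 for n in range(len(temp)-1)]
--     for level in range(len(temp)-1):
--         obtained = temp[level][1]-temp[level][0]
--         levels[level+1] = [levels[level+1][0]-obtained, levels[level+1][1]]
--         temp[level + 1] = [temp[level + 1][0] - obtained, temp[level + 1][1]]
--         answer[level] = obtained
--     answer.reverse()
--     return answer
-- ===== SOURCE B (Python) =====
-- def follow_through(levels):
--     # One pass of running prefix sums of (end - start), consed onto the front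
--     # so the answer comes out already reversed.  Unlike A, this does not
--     # mutate the caller's list (return value is identical).
--     answer = []
--     running = 0
--     for i in range(len(levels) - 1):
--         running += levels[i][1] - levels[i][0]
--         answer = [running] + answer
--     return answer
-- ===== Notes on version B (the rewrite author's own statement) =====
-- stated objective: simpler
-- what changed: Replaces A's fused loop that copies the list and reads back its own in-place mutations with a single pure pass of a running prefix sum of (end-start), consing each sum onto the front so no final reverse and no mutation of the input are needed.
import Mathlib
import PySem

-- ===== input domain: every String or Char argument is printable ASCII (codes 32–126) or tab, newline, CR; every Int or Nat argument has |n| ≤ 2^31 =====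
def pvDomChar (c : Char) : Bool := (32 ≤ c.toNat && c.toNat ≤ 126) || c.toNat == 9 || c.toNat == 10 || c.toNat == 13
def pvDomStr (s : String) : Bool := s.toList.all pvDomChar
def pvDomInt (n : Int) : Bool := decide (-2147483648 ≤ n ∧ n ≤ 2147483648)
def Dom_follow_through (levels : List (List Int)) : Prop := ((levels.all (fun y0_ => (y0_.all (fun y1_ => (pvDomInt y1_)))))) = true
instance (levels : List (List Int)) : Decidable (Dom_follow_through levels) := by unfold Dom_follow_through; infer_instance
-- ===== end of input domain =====

-- B replaces A's fused copy-and-mutate index loop by one pure pass of a running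
-- prefix sum consed to the front (already reversed); A mutates `levels` in place and
-- B does not — the equivalence proved here is about the RETURN value only.


-- ===== PORT A =====
def follow_through (levels : List (List Int)) : List Int :=
  let temp := PySem.List.slice levels none none                       -- temp = levels[::]
  let answer : List Int :=
    (PySem.List.pyRange 0 ((temp.length : Int) - 1) 1).map (fun _ => (0:Int))  -- [0 for n in range(len(temp)-1)]
  let st :=
    (PySem.List.pyRange 0 ((temp.length : Int) - 1) 1).foldl
      (fun (st : List (List Int) × List (List Int) × List Int) level =>
        let lv := st.1
        let tm := st.2.1
        let ans := st.2.2
        let obtained := PySem.List.pyGetD (PySem.List.pyGetD tm level []) 1 0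
                        - PySem.List.pyGetD (PySem.List.pyGetD tm level []) 0 0
        let lv' := PySem.List.pySetD lv (level + 1)
            [PySem.List.pyGetD (PySem.List.pyGetD lv (level + 1) []) 0 0 - obtained,
             PySem.List.pyGetD (PySem.List.pyGetD lv (level + 1) []) 1 0]
        let tm' := PySem.List.pySetD tm (level + 1)
            [PySem.List.pyGetD (PySem.List.pyGetD tm (level + 1) []) 0 0 - obtained,
             PySem.List.pyGetD (PySem.List.pyGetD tm (level + 1) []) 1 0]
        let ans' := PySem.List.pySetD ans level obtained
        (lv', tm', ans'))
      (levels, temp, answer)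
  st.2.2.reverse                                                      -- answer.reverse(); return answer

-- ===== PORT B =====
def follow_through_alt (levels : List (List Int)) : List Int :=
  ((PySem.List.pyRange 0 ((levels.length : Int) - 1) 1).foldl
      (fun (st : List Int × Int) i =>
        let running := st.2 + (PySem.List.pyGetD (PySem.List.pyGetD levels i []) 1 0
                               - PySem.List.pyGetD (PySem.List.pyGetD levels i []) 0 0)
        (running :: st.1, running))                                   -- answer = [running] + answer
      ([], 0)).1

-- ===== PRECONDITION & SPEC =====
-- Pre_: exactly the inputs where Python A returns (with ≥ 2 rows, every row is
-- indexed at [0] and [1], so a row shorter than 2 raises IndexError).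
def Pre_follow_through (levels : List (List Int)) : Prop :=
  levels.length ≤ 1 ∨ ∀ row ∈ levels, 2 ≤ row.length
instance (levels : List (List Int)) : Decidable (Pre_follow_through levels) := by
  unfold Pre_follow_through; infer_instance

def pvWitness_follow_through : List (List Int) := [[1, 3], [2, 5], [0, 4]]

def Spec_follow_through (levels : List (List Int)) (out : List Int) : Prop := out = follow_through_alt levels
instance (levels : List (List Int)) (out : List Int) : Decidable (Spec_follow_through levels out) := by unfold Spec_follow_through; infer_instance

-- ===== CLAIM (what is proved, stated in full; the proofs are below) =====
def Claim_equal_follow_through : Prop := ∀ (levels : List (List Int)), Dom_follow_through levels → Pre_follow_through levels → Spec_follow_through levels (follow_through levels)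

-- ===== LEMMAS AND PROOFS =====

-- the per-row delta of the ORIGINAL list, and its prefix sums
def pvD (levels : List (List Int)) (j : Nat) : Int :=
  (levels.getD j []).getD 1 0 - (levels.getD j []).getD 0 0

def pvS (levels : List (List Int)) (m : Nat) : Int :=
  ((List.range m).map (pvD levels)).sum

-- the state of A's `levels`/`temp` after m iterations
def pvMut (levels : List (List Int)) (m : Nat) : List (List Int) :=
  levels.mapIdx (fun j row =>
    if 1 ≤ j ∧ j ≤ m then [row.getD 0 0 - pvS levels j, row.getD 1 0] else row)

-- the state of A's `answer` after m iterations
def pvAns (levels : List (List Int)) (m : Nat) : List Int :=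
  (List.range m).map (fun j => pvS levels (j + 1)) ++ List.replicate (levels.length - 1 - m) 0

-- A's loop body, named (definitionally equal to the lambda in the port)
def pvStepA (st : List (List Int) × List (List Int) × List Int) (level : Int) :
    List (List Int) × List (List Int) × List Int :=
  let lv := st.1
  let tm := st.2.1
  let ans := st.2.2
  let obtained := PySem.List.pyGetD (PySem.List.pyGetD tm level []) 1 0
                  - PySem.List.pyGetD (PySem.List.pyGetD tm level []) 0 0
  let lv' := PySem.List.pySetD lv (level + 1)
      [PySem.List.pyGetD (PySem.List.pyGetD lv (level + 1) []) 0 0 - obtained,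
       PySem.List.pyGetD (PySem.List.pyGetD lv (level + 1) []) 1 0]
  let tm' := PySem.List.pySetD tm (level + 1)
      [PySem.List.pyGetD (PySem.List.pyGetD tm (level + 1) []) 0 0 - obtained,
       PySem.List.pyGetD (PySem.List.pyGetD tm (level + 1) []) 1 0]
  let ans' := PySem.List.pySetD ans level obtained
  (lv', tm', ans')

-- B's loop body, named
def pvStepB (levels : List (List Int)) (st : List Int × Int) (i : Int) : List Int × Int :=
  let running := st.2 + (PySem.List.pyGetD (PySem.List.pyGetD levels i []) 1 0
                         - PySem.List.pyGetD (PySem.List.pyGetD levels i []) 0 0)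
  (running :: st.1, running)

lemma follow_through_eq (levels : List (List Int)) :
    follow_through levels =
      ((PySem.List.pyRange 0 ((levels.length : Int) - 1) 1).foldl pvStepA
        (levels, levels, List.replicate (levels.length - 1) 0)).2.2.reverse := by
  simp only [follow_through, PySem.List.slice_none_none]
  have hans : (PySem.List.pyRange 0 ((levels.length : Int) - 1) 1).map (fun _ => (0:Int)) =
      List.replicate (levels.length - 1) 0 := by
    simp [PySem.List.pyRange_one, Function.comp_def, List.map_const']
  rw [hans]
  rfl

lemma follow_through_alt_eq (levels : List (List Int)) :
    follow_through_alt levels =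
      ((PySem.List.pyRange 0 ((levels.length : Int) - 1) 1).foldl (pvStepB levels) ([], 0)).1 := by
  rfl

lemma pvMut_zero (levels : List (List Int)) : pvMut levels 0 = levels := by
  apply List.ext_getElem <;> simp [pvMut]
  omega

lemma pvMut_getD (levels : List (List Int)) (m j : Nat) (hj : j < levels.length) :
    (pvMut levels m).getD j [] = if 1 ≤ j ∧ j ≤ m then
      [(levels.getD j []).getD 0 0 - pvS levels j, (levels.getD j []).getD 1 0]
    else levels.getD j [] := by
  rw [List.getD_eq_getElem _ _ (by simpa [pvMut] using hj),
      List.getD_eq_getElem _ _ hj]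
  simp [pvMut]

-- the value A's loop computes as `obtained` at iteration k is the (k+1)-st prefix sum
lemma pvObt (levels : List (List Int)) (k : Nat) (hk : k < levels.length) :
    ((pvMut levels k).getD k []).getD 1 0 - ((pvMut levels k).getD k []).getD 0 0 =
    pvS levels (k + 1) := by
  rw [pvMut_getD levels k k hk]
  by_cases h0 : k = 0
  · subst h0
    simp [pvS, pvD]
  · have : 1 ≤ k ∧ k ≤ k := by omega
    rw [if_pos this]
    simp [pvS, pvD, List.range_succ]
    ring

lemma pvSet_mut (levels : List (List Int)) (k : Nat) (hk1 : k + 1 < levels.length) :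
    (pvMut levels k).set (k + 1)
      [((pvMut levels k).getD (k + 1) []).getD 0 0 - pvS levels (k + 1),
       ((pvMut levels k).getD (k + 1) []).getD 1 0] = pvMut levels (k + 1) := by
  rw [pvMut_getD levels k (k + 1) hk1, if_neg (by omega)]
  apply List.ext_getElem
  · simp [pvMut]
  · intro j hj hj2
    rw [List.getElem_set]
    by_cases hjk : k + 1 = j
    · subst hjk
      rw [if_pos rfl, List.getD_eq_getElem _ _ hk1]
      simp only [pvMut, List.getElem_mapIdx]
      rw [if_pos ⟨by omega, le_rfl⟩]
    · rw [if_neg hjk]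
      have hiff : (1 ≤ j ∧ j ≤ k) ↔ (1 ≤ j ∧ j ≤ k + 1) := by omega
      simp only [pvMut, List.getElem_mapIdx, hiff]

lemma pvSet_ans (levels : List (List Int)) (k : Nat) (hk : k + 1 ≤ levels.length - 1) :
    (pvAns levels k).set k (pvS levels (k + 1)) = pvAns levels (k + 1) := by
  unfold pvAns
  have hrep : levels.length - 1 - k = (levels.length - 1 - (k + 1)) + 1 := by omega
  rw [hrep, List.replicate_succ, List.set_append_right _ _ (by simp),
      List.range_succ, List.map_append]
  simp

lemma A_inv (levels : List (List Int))
    (m : Nat) (hm : m ≤ levels.length - 1) :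
    (PySem.List.pyRange 0 (m : Int) 1).foldl pvStepA
      (levels, levels, List.replicate (levels.length - 1) 0) =
    (pvMut levels m, pvMut levels m, pvAns levels m) := by
  induction m with
  | zero =>
    rw [PySem.List.pyRange_one_eq_nil (by norm_num), List.foldl_nil, pvMut_zero]
    simp [pvAns]
  | succ k ih =>
    have hk1 : k + 1 < levels.length := by omega
    have hcast : ((k + 1 : Nat) : Int) = (k : Int) + 1 := by push_cast; ring
    rw [hcast, PySem.List.pyRange_one_succ_right (by exact_mod_cast Nat.zero_le k),
      List.foldl_append, ih (by omega), List.foldl_cons, List.foldl_nil]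
    show pvStepA (pvMut levels k, pvMut levels k, pvAns levels k) (k : Int) = _
    simp only [pvStepA, ← hcast, PySem.List.pySetD_natCast, PySem.List.pyGetD_natCast,
      PySem.List.pyGetD_ofNat']
    have h0 := pvObt levels k (by omega)
    have h1 := pvSet_mut levels k hk1
    have h2 := pvSet_ans levels k hm
    rw [h0, h1, h2]

lemma B_inv (levels : List (List Int)) (m : Nat) (hm : m ≤ levels.length - 1) :
    (PySem.List.pyRange 0 (m : Int) 1).foldl (pvStepB levels) ([], 0) =
    (((List.range m).map (fun j => pvS levels (j + 1))).reverse, pvS levels m) := by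
  induction m with
  | zero => simp [pvS, PySem.List.pyRange_one_eq_nil]
  | succ k ih =>
    have hcast : ((k + 1 : Nat) : Int) = (k : Int) + 1 := by push_cast; ring
    rw [hcast, PySem.List.pyRange_one_succ_right (by exact_mod_cast Nat.zero_le k),
      List.foldl_append, ih (by omega)]
    simp [pvStepB, pvS, pvD, List.range_succ, PySem.List.pyGetD_ofNat']

-- ===== VERDICT (by name: the statement is the Claim_ definition above) =====
theorem follow_through_spec : Claim_equal_follow_through := by
  intro levels _ _
  show follow_through levels = follow_through_alt levels
  rw [follow_through_eq, follow_through_alt_eq]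
  by_cases hn : levels.length ≤ 1
  · have hz : (levels.length : Int) - 1 ≤ 0 := by omega
    rw [PySem.List.pyRange_one_eq_nil hz]
    have h0 : levels.length - 1 = 0 := by omega
    simp [h0]
  · have hc : ((levels.length : Int) - 1) = ((levels.length - 1 : Nat) : Int) := by omega
    rw [hc, A_inv levels _ le_rfl, B_inv levels _ le_rfl]
    simp [pvAns]
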